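-- pv_equiv track=rewrite | github.com/alex-rawlings/baggins | papers/paper-kicksurvey/scripts/bound_stars.py | log_minor_ticks
-- ===== SOURCE A (Python) =====
-- def log_minor_ticks(linthresh, max_exp=5):
--     ticks = []
--     # Positive side
--     for exp in range(1, max_exp + 1):
--         for sub in range(2, 10):
--             val = sub * 10 ** (exp - 1)
--             if val > linthresh:
--                 ticks.append(val)
--     # Negative side (mirror)
--     ticks += [-t for t in ticks]
--     return sorted(ticks)
-- ===== SOURCE B (Python) =====
-- def log_minor_ticks(linthresh, max_exp=5):
--     # Emit ticks directly in sorted order: negative side descending in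
--     # magnitude first, then the positive side ascending.  No sort needed.
--     ticks = []
--     for exp in range(max_exp, 0, -1):
--         for sub in range(9, 1, -1):
--             base = sub * 10 ** (exp - 1)
--             if base > linthresh:
--                 ticks.append(-base)
--     for exp in range(1, max_exp + 1):
--         for sub in range(2, 10):
--             val = sub * 10 ** (exp - 1)
--             if val > linthresh:
--                 ticks.append(val)
--     return ticks
-- ===== Notes on version B (the rewrite author's own statement) =====
-- stated objective: alternative
-- what changed: B emits the ticks directly in sorted order (negative side by descending magnitude, then positive side ascending) in two ordered passes, eliminating A's mirroring list comprehension and final sorted() call.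
import Mathlib
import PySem

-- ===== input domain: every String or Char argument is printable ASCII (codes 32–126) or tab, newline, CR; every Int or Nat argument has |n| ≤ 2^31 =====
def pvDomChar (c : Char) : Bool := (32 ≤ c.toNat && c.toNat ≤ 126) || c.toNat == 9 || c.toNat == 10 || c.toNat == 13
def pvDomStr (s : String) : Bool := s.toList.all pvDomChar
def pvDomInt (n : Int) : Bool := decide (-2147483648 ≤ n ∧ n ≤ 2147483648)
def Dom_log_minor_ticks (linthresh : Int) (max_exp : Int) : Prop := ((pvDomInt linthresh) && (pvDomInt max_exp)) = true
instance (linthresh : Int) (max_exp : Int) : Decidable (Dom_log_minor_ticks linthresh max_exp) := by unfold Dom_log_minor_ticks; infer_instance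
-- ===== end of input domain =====

-- B emits the ticks directly in sorted order (negative side by descending magnitude,
-- then positive side ascending) in two ordered passes, eliminating A's mirroring
-- comprehension and final sorted() call (objective: alternative).

-- ===== PORT A =====
def log_minor_ticks (linthresh : Int) (max_exp : Int) : List Int :=
  let ticks : List Int := (PySem.List.pyRange 1 (max_exp + 1) 1).foldl
    (fun ticks exp =>
      (PySem.List.pyRange 2 10 1).foldl
        (fun ticks sub =>
          let val := sub * 10 ^ (exp - 1).toNat
          if val > linthresh then ticks ++ [val] else ticks)
        ticks)
    []
  let ticks := ticks ++ ticks.map (fun t => -t)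
  PySem.List.sorted ticks (fun x => x)

-- ===== PORT B =====
def log_minor_ticks_alt (linthresh : Int) (max_exp : Int) : List Int :=
  let ticks : List Int := (PySem.List.pyRange max_exp 0 (-1)).foldl
    (fun ticks exp =>
      (PySem.List.pyRange 9 1 (-1)).foldl
        (fun ticks sub =>
          let base := sub * 10 ^ (exp - 1).toNat
          if base > linthresh then ticks ++ [-base] else ticks)
        ticks)
    []
  let ticks := (PySem.List.pyRange 1 (max_exp + 1) 1).foldl
    (fun ticks exp =>
      (PySem.List.pyRange 2 10 1).foldl
        (fun ticks sub =>
          let val := sub * 10 ^ (exp - 1).toNat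
          if val > linthresh then ticks ++ [val] else ticks)
        ticks)
    ticks
  ticks

-- ===== PRECONDITION & SPEC =====
def Spec_log_minor_ticks (linthresh : Int) (max_exp : Int) (out : List Int) : Prop := out = log_minor_ticks_alt linthresh max_exp
instance (linthresh : Int) (max_exp : Int) (out : List Int) : Decidable (Spec_log_minor_ticks linthresh max_exp out) := by unfold Spec_log_minor_ticks; infer_instance

-- ===== CLAIM (what is proved, stated in full; the proofs are below) =====
def Claim_equal_log_minor_ticks : Prop := ∀ (linthresh : Int) (max_exp : Int), Dom_log_minor_ticks linthresh max_exp → Spec_log_minor_ticks linthresh max_exp (log_minor_ticks linthresh max_exp)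

-- ===== LEMMAS AND PROOFS =====

-- The positive ticks, in the generation order shared by both programs' positive loops.
def posTicks (lt me : Int) : List Int :=
  (PySem.List.pyRange 1 (me + 1) 1).flatMap
    (fun e => ((PySem.List.pyRange 2 10 1).filter
        (fun s => decide (lt < s * 10 ^ (e - 1).toNat))).map
      (fun s => s * 10 ^ (e - 1).toNat))

-- the inner positive-side loop appends the filtered multiples of 10^(e-1)
lemma innerA (lt e : Int) (acc : List Int) :
    (PySem.List.pyRange 2 10 1).foldl
      (fun ticks sub =>
        let val := sub * 10 ^ (e - 1).toNat
        if val > lt then ticks ++ [val] else ticks) acc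
    = acc ++ ((PySem.List.pyRange 2 10 1).filter
        (fun s => decide (lt < s * 10 ^ (e - 1).toNat))).map
      (fun s => s * 10 ^ (e - 1).toNat) := by
  have h := PySem.List.foldl_append_if
    (fun s : Int => decide (lt < s * 10 ^ (e - 1).toNat))
    (fun s : Int => s * 10 ^ (e - 1).toNat)
    (PySem.List.pyRange 2 10 1) acc
  simpa using h

-- the positive-side double loop produces posTicks
lemma posLoop (lt me : Int) (acc : List Int) :
    (PySem.List.pyRange 1 (me + 1) 1).foldl
      (fun ticks exp =>
        (PySem.List.pyRange 2 10 1).foldl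
          (fun ticks sub =>
            let val := sub * 10 ^ (exp - 1).toNat
            if val > lt then ticks ++ [val] else ticks)
          ticks) acc
    = acc ++ posTicks lt me := by
  have hb : (fun (ticks : List Int) (exp : Int) =>
      (PySem.List.pyRange 2 10 1).foldl
        (fun ticks sub =>
          let val := sub * 10 ^ (exp - 1).toNat
          if val > lt then ticks ++ [val] else ticks)
        ticks)
      = (fun (ticks : List Int) (exp : Int) => ticks ++
          ((PySem.List.pyRange 2 10 1).filter
            (fun s => decide (lt < s * 10 ^ (exp - 1).toNat))).map
          (fun s => s * 10 ^ (exp - 1).toNat)) := by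
    funext ticks exp; exact innerA lt exp ticks
  rw [hb, PySem.List.foldl_append_eq_flatMap]; rfl

-- the inner negative-side loop of B
lemma innerB (lt e : Int) (acc : List Int) :
    (PySem.List.pyRange 9 1 (-1)).foldl
      (fun ticks sub =>
        let base := sub * 10 ^ (e - 1).toNat
        if base > lt then ticks ++ [-base] else ticks) acc
    = acc ++ ((PySem.List.pyRange 9 1 (-1)).filter
        (fun s => decide (lt < s * 10 ^ (e - 1).toNat))).map
      (fun s => -(s * 10 ^ (e - 1).toNat)) := by
  have h := PySem.List.foldl_append_if
    (fun s : Int => decide (lt < s * 10 ^ (e - 1).toNat))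
    (fun s : Int => -(s * 10 ^ (e - 1).toNat))
    (PySem.List.pyRange 9 1 (-1)) acc
  simpa using h

-- B's negative-side loop produces the mirrored positive ticks, magnitude descending
lemma negLoop (lt me : Int) :
    (PySem.List.pyRange me 0 (-1)).foldl
      (fun ticks exp =>
        (PySem.List.pyRange 9 1 (-1)).foldl
          (fun ticks sub =>
            let base := sub * 10 ^ (exp - 1).toNat
            if base > lt then ticks ++ [-base] else ticks)
          ticks) ([] : List Int)
    = ((posTicks lt me).map (fun t => -t)).reverse := by
  have hb : (fun (ticks : List Int) (exp : Int) =>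
      (PySem.List.pyRange 9 1 (-1)).foldl
        (fun ticks sub =>
          let base := sub * 10 ^ (exp - 1).toNat
          if base > lt then ticks ++ [-base] else ticks)
        ticks)
      = (fun (ticks : List Int) (exp : Int) => ticks ++
          ((PySem.List.pyRange 9 1 (-1)).filter
            (fun s => decide (lt < s * 10 ^ (exp - 1).toNat))).map
          (fun s => -(s * 10 ^ (exp - 1).toNat))) := by
    funext ticks exp; exact innerB lt exp ticks
  rw [hb, PySem.List.foldl_append_eq_flatMap, List.nil_append]
  have hR : PySem.List.pyRange 9 1 (-1) = (PySem.List.pyRange 2 10 1).reverse :=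
    PySem.List.pyRange_neg_one_eq_reverse 9 1
  have hL : PySem.List.pyRange me 0 (-1) = (PySem.List.pyRange 1 (me + 1) 1).reverse := by
    simpa using PySem.List.pyRange_neg_one_eq_reverse me 0
  rw [hR, hL]
  unfold posTicks
  rw [List.map_flatMap, List.reverse_flatMap]
  congr 1
  funext e
  simp [Function.comp, List.filter_reverse, List.map_reverse]

lemma nine_lt_two_pow (a b : Nat) (h : a < b) : (9 : Int) * 10 ^ a < 2 * 10 ^ b := by
  have h1 : (10 : Int) ^ (a + 1) ≤ 10 ^ b := pow_le_pow_right₀ (by norm_num) (by omega)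
  have h2 : (0 : Int) < 10 ^ b := by positivity
  have h3 : (0 : Int) < 10 ^ a := by positivity
  calc (9 : Int) * 10 ^ a < 10 * 10 ^ a := by linarith
    _ = 10 ^ (a + 1) := by ring
    _ ≤ 10 ^ b := h1
    _ < 2 * 10 ^ b := by linarith

lemma posTicks_pos (lt me : Int) : ∀ x ∈ posTicks lt me, 0 < x := by
  intro x hx
  simp only [posTicks, List.mem_flatMap, List.mem_map, List.mem_filter,
    PySem.List.mem_pyRange_one] at hx
  obtain ⟨e, -, s, ⟨⟨hs1, -⟩, -⟩, rfl⟩ := hx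
  have ht : (0 : Int) < 10 ^ (e - 1).toNat := by positivity
  nlinarith

lemma posTicks_pairwise (lt me : Int) : (posTicks lt me).Pairwise (· < ·) := by
  unfold posTicks
  rw [List.pairwise_flatMap]
  constructor
  · intro e he
    rw [List.pairwise_map]
    refine List.Pairwise.filter _ ?_
    have ht : (0 : Int) < 10 ^ (e - 1).toNat := by positivity
    exact (PySem.List.pairwise_lt_pyRange_one 2 10).imp
      (fun hab => mul_lt_mul_of_pos_right hab ht)
  · refine (PySem.List.pairwise_lt_pyRange_one 1 (me + 1)).imp_of_mem ?_
    intro a b ha hb hab x hx y hy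
    have ha1 : 1 ≤ a := ((PySem.List.mem_pyRange_one).1 ha).1
    have hb1 : 1 ≤ b := ((PySem.List.mem_pyRange_one).1 hb).1
    simp only [List.mem_map, List.mem_filter, PySem.List.mem_pyRange_one] at hx hy
    obtain ⟨s, ⟨⟨hs1, hs2⟩, -⟩, rfl⟩ := hx
    obtain ⟨u, ⟨⟨hu1, -⟩, -⟩, rfl⟩ := hy
    have hta : (0 : Int) < 10 ^ (a - 1).toNat := by positivity
    have htb : (0 : Int) < 10 ^ (b - 1).toNat := by positivity
    have hkey : (9 : Int) * 10 ^ (a - 1).toNat < 2 * 10 ^ (b - 1).toNat :=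
      nine_lt_two_pow _ _ (by omega)
    nlinarith

lemma ports_eq (lt me : Int) : log_minor_ticks lt me = log_minor_ticks_alt lt me := by
  have hA : log_minor_ticks lt me
      = PySem.List.sorted (posTicks lt me ++ (posTicks lt me).map (fun t => -t)) (fun x => x) := by
    simp only [log_minor_ticks]
    rw [posLoop lt me [], List.nil_append]
  have hB : log_minor_ticks_alt lt me
      = ((posTicks lt me).map (fun t => -t)).reverse ++ posTicks lt me := by
    simp only [log_minor_ticks_alt]
    rw [negLoop lt me, posLoop lt me]
  rw [hA, hB]
  apply PySem.List.sorted_eq_of_perm_of_pairwise_lt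
  · exact ((((posTicks lt me).map (fun t => -t)).reverse_perm).append_right _).trans
      List.perm_append_comm
  · rw [List.pairwise_append]
    refine ⟨?_, posTicks_pairwise lt me, ?_⟩
    · rw [List.pairwise_reverse, List.pairwise_map]
      exact (posTicks_pairwise lt me).imp (fun hab => by omega)
    · intro x hx y hy
      rw [List.mem_reverse, List.mem_map] at hx
      obtain ⟨p, hp, rfl⟩ := hx
      have := posTicks_pos lt me p hp
      have := posTicks_pos lt me y hy
      omega

-- ===== VERDICT (by name: the statement is the Claim_ definition above) =====
theorem log_minor_ticks_spec : Claim_equal_log_minor_ticks := by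
  intro lt me _
  unfold Spec_log_minor_ticks
  exact ports_eq lt me
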